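-- pv_equiv track=rewrite | github.com/sun-huangqingbo/active-matrix-completion | doc6.py | Count_Col_Score
-- ===== SOURCE A (Python) =====
-- def Count_Col_Score(col, col2, panelty, currdata):
--     score = 0
--     for row in currdata:
--         if row[col] != 'uuu' and row[col2] != 'uuu' and row[col] == row[col2]:
--             score += 1
--         if row[col] != 'uuu' and row[col2] != 'uuu' and row[col] != row[col2]:
--             score -= panelty
--     return score
-- ===== SOURCE B (Python) =====
-- def Count_Col_Score(col, col2, panelty, currdata):
--     # Stage 1: frequency table keyed by the (row[col], row[col2]) value pair.
--     freq = {}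
--     for row in currdata:
--         key = (row[col], row[col2])
--         freq[key] = freq.get(key, 0) + 1
--     # Stage 2: aggregate over DISTINCT pairs, weighting by multiplicity.
--     t = 0
--     m = 0
--     for (a, b), c in freq.items():
--         if a != 'uuu' and b != 'uuu':
--             t += c
--             if a == b:
--                 m += c
--     return m - (t - m) * panelty
-- ===== Notes on version B (the rewrite author's own statement) =====
-- stated objective: alternative
-- what changed: Replaces A's per-row score-mutating loop with two branches by a frequency-table design: build a dict counting each distinct (row[col], row[col2]) value pair, then aggregate match/valid counts over the distinct keys weighted by multiplicity and combine with the closed form m - (t - m) * panelty.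
-- outside the precondition, e.g. on Count_Col_Score(0, 5, 1, [['uuu']]): A returns 0, B raises IndexError
import Mathlib
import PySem

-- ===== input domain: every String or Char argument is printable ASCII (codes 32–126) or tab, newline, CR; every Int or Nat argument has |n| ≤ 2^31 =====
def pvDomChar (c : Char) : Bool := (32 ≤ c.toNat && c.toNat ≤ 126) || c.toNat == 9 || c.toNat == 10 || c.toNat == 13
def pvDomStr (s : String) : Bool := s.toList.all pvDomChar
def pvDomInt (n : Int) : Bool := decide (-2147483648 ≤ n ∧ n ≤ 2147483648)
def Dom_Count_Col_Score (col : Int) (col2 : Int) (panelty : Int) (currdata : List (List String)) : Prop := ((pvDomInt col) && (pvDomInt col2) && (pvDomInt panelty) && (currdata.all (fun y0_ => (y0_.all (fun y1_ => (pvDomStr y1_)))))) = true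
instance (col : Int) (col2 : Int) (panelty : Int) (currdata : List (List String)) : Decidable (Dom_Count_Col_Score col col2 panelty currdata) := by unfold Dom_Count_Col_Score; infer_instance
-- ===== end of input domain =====

-- B replaces A's per-row score-mutating loop by a frequency table over distinct (row[col], row[col2]) pairs, aggregated with the closed form m - (t - m) * panelty; same O(n) cost.


-- ===== PORT A =====
-- literal port of A's loop; row[col] is exact under Pre_ (index in range), where pyGetD's default is never consulted
def Count_Col_Score (col : Int) (col2 : Int) (panelty : Int) (currdata : List (List String)) : Int :=
  currdata.foldl (fun score row =>
    let a := PySem.List.pyGetD row col "uuu"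
    let b := PySem.List.pyGetD row col2 "uuu"
    let score := if a ≠ "uuu" ∧ b ≠ "uuu" ∧ a = b then score + 1 else score
    if a ≠ "uuu" ∧ b ≠ "uuu" ∧ a ≠ b then score - panelty else score) 0

-- ===== PORT B =====
-- port of Source B: stage 1 builds the frequency dict of (row[col], row[col2]) pairs, stage 2 folds over its items
def Count_Col_Score_alt (col : Int) (col2 : Int) (panelty : Int) (currdata : List (List String)) : Int :=
  let freq : PySem.Dict (String × String) Int :=
    currdata.foldl (fun d row =>
      let key := (PySem.List.pyGetD row col "uuu", PySem.List.pyGetD row col2 "uuu")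
      d.insert key (d.getD key 0 + 1)) PySem.Dict.empty
  let tm : Int × Int :=
    freq.items.foldl (fun tm kv =>
      if kv.1.1 ≠ "uuu" ∧ kv.1.2 ≠ "uuu" then
        (tm.1 + kv.2, if kv.1.1 = kv.1.2 then tm.2 + kv.2 else tm.2)
      else tm) (0, 0)
  tm.2 - (tm.1 - tm.2) * panelty

-- ===== PRECONDITION & SPEC =====
-- Pre_ excludes inputs where some row is shorter than a requested column index; on a few of these A still returns (its 'and' short-circuits past row[col2] when row[col] == 'uuu') while B's key construction always indexes both columns and raises there.
def Pre_Count_Col_Score (col : Int) (col2 : Int) (panelty : Int) (currdata : List (List String)) : Prop :=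
  ∀ row ∈ currdata, PySem.Raise.InRange row.length col ∧ PySem.Raise.InRange row.length col2
instance (col : Int) (col2 : Int) (panelty : Int) (currdata : List (List String)) : Decidable (Pre_Count_Col_Score col col2 panelty currdata) := by unfold Pre_Count_Col_Score; infer_instance
def pvWitness_Count_Col_Score : Int × Int × Int × List (List String) :=
  (0, 1, 2, [["a", "a"], ["a", "b"], ["uuu", "a"], ["a", "b"]])
def Spec_Count_Col_Score (col : Int) (col2 : Int) (panelty : Int) (currdata : List (List String)) (out : Int) : Prop := out = Count_Col_Score_alt col col2 panelty currdata
instance (col : Int) (col2 : Int) (panelty : Int) (currdata : List (List String)) (out : Int) : Decidable (Spec_Count_Col_Score col col2 panelty currdata out) := by unfold Spec_Count_Col_Score; infer_instance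

-- ===== CLAIM (what is proved, stated in full; the proofs are below) =====
def Claim_equal_Count_Col_Score : Prop := ∀ (col : Int) (col2 : Int) (panelty : Int) (currdata : List (List String)), Dom_Count_Col_Score col col2 panelty currdata → Pre_Count_Col_Score col col2 panelty currdata → Spec_Count_Col_Score col col2 panelty currdata (Count_Col_Score col col2 panelty currdata)

-- ===== LEMMAS AND PROOFS =====

-- per-key contribution to the score
def pvScoreOf (panelty : Int) (k : String × String) : Int :=
  if k.1 ≠ "uuu" ∧ k.2 ≠ "uuu" then (if k.1 = k.2 then 1 else -panelty) else 0

-- A's fold accumulates the sum of per-row contributions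
theorem a_fold_eq_sum (col col2 panelty : Int) :
    ∀ (rows : List (List String)) (s : Int),
      rows.foldl (fun score row =>
        let a := PySem.List.pyGetD row col "uuu"
        let b := PySem.List.pyGetD row col2 "uuu"
        let score := if a ≠ "uuu" ∧ b ≠ "uuu" ∧ a = b then score + 1 else score
        if a ≠ "uuu" ∧ b ≠ "uuu" ∧ a ≠ b then score - panelty else score) s
      = s + ((rows.map (fun row =>
          pvScoreOf panelty (PySem.List.pyGetD row col "uuu", PySem.List.pyGetD row col2 "uuu"))).sum) := by
  intro rows
  induction rows with
  | nil => intro s; simp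
  | cons r rest ih =>
    intro s
    simp only [List.foldl_cons, List.map_cons, List.sum_cons, ih]
    by_cases hv : PySem.List.pyGetD r col "uuu" ≠ "uuu" ∧ PySem.List.pyGetD r col2 "uuu" ≠ "uuu"
    · by_cases he : PySem.List.pyGetD r col "uuu" = PySem.List.pyGetD r col2 "uuu"
      · simp [pvScoreOf, hv, he]; ring
      · simp [pvScoreOf, hv, he]; ring
    · rw [not_and_or] at hv
      rcases hv with h | h
      · simp at h; simp [pvScoreOf, h]
      · simp at h; simp [pvScoreOf, h]

-- B's item fold combined as m - (t - m) * panelty equals the multiplicity-weighted sum of contributions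
theorem pair_fold_eq (panelty : Int) :
    ∀ (L : List ((String × String) × Int)) (t0 m0 : Int),
      (let tm := L.foldl (fun tm kv =>
          if kv.1.1 ≠ "uuu" ∧ kv.1.2 ≠ "uuu" then
            (tm.1 + kv.2, if kv.1.1 = kv.1.2 then tm.2 + kv.2 else tm.2)
          else tm) (t0, m0)
       tm.2 - (tm.1 - tm.2) * panelty)
      = (m0 - (t0 - m0) * panelty) + (L.map (fun kv => kv.2 * pvScoreOf panelty kv.1)).sum := by
  intro L
  induction L with
  | nil => intro t0 m0; simp
  | cons kv rest ih =>
    intro t0 m0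
    simp only [List.foldl_cons, List.map_cons, List.sum_cons]
    by_cases hv : kv.1.1 ≠ "uuu" ∧ kv.1.2 ≠ "uuu"
    · by_cases he : kv.1.1 = kv.1.2
      · simp only [he, ih, if_pos]
        simp [pvScoreOf, hv, he]; ring
      · simp only [he, ih]
        simp [pvScoreOf, hv, he]; ring
    · simp only [hv, if_neg, ih, not_false_iff]
      simp [pvScoreOf, hv]

-- over a nodup list containing x, the indicator-weighted sum picks out g x
theorem sum_indicator_of_nodup {K : Type} [DecidableEq K] (g : K → Int) (x : K) :
    ∀ (s : List K), s.Nodup → x ∈ s →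
      (s.map (fun k => if k = x then g k else 0)).sum = g x := by
  intro s
  induction s with
  | nil => intro _ h; cases h
  | cons a rest ih =>
    intro hnd hmem
    simp only [List.map_cons, List.sum_cons]
    rcases List.mem_cons.mp hmem with hax | hx
    · have hrest : (rest.map (fun k => if k = x then g k else 0)).sum = 0 := by
        apply List.sum_eq_zero
        intro y hy
        rcases List.mem_map.mp hy with ⟨k, hk, rfl⟩
        have : k ≠ x := fun h => (List.nodup_cons.mp hnd).1 (hax ▸ h ▸ hk)
        simp [this]
      rw [hrest]
      simp [← hax]
    · have ha : a ≠ x := fun h => (List.nodup_cons.mp hnd).1 (h ▸ hx)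
      rw [ih (List.nodup_cons.mp hnd).2 hx]
      simp [ha]

-- the multiplicity-weighted sum over the distinct keys equals the plain sum over all keys
theorem sum_count_ofList (g : (String × String) → Int) :
    ∀ (l : List (String × String)),
      ((PySem.Set.ofList l).map (fun k => ((l.count k : Nat) : Int) * g k)).sum = (l.map g).sum := by
  intro l
  induction l using List.reverseRecOn with
  | nil => simp [PySem.Set.ofList_nil]
  | append_singleton l x ih =>
    rw [PySem.Set.ofList_append_singleton]
    have hcount : ∀ k, ((l ++ [x]).count k) = l.count k + (if k = x then 1 else 0) := by
      intro k
      rw [List.count_append]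
      by_cases h : k = x
      · simp [h]
      · simp [h, List.count_eq_zero]
    by_cases hx : x ∈ PySem.Set.ofList l
    · rw [PySem.Set.add_of_mem hx]
      have : ((PySem.Set.ofList l).map (fun k => (((l ++ [x]).count k : Nat) : Int) * g k)).sum
          = ((PySem.Set.ofList l).map (fun k => ((l.count k : Nat) : Int) * g k)).sum
            + ((PySem.Set.ofList l).map (fun k => if k = x then g k else 0)).sum := by
        rw [← List.sum_map_add]
        apply congrArg
        apply List.map_congr_left
        intro k _
        rw [hcount k]
        by_cases h : k = x
        · simp [h]; ring
        · simp [h]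
      rw [this, ih, sum_indicator_of_nodup g x _ (PySem.Set.nodup_ofList l) hx]
      simp
    · rw [PySem.Set.add_of_not_mem hx]
      have hxl : x ∉ l := fun h => hx ((PySem.Set.mem_ofList l x).mpr h)
      rw [List.map_append, List.sum_append]
      have h1 : ((PySem.Set.ofList l).map (fun k => (((l ++ [x]).count k : Nat) : Int) * g k)).sum
          = ((PySem.Set.ofList l).map (fun k => ((l.count k : Nat) : Int) * g k)).sum := by
        apply congrArg
        apply List.map_congr_left
        intro k hk
        have : k ≠ x := fun h => hxl (h ▸ (PySem.Set.mem_ofList l k).mp hk)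
        rw [hcount k]
        simp [this]
      rw [h1, ih]
      simp [List.count_eq_zero.mpr hxl]

-- ===== VERDICT (by name: the statement is the Claim_ definition above) =====
theorem Count_Col_Score_spec : Claim_equal_Count_Col_Score := by
  intro col col2 panelty currdata _ _
  unfold Spec_Count_Col_Score Count_Col_Score
  have hfreq : currdata.foldl (fun d row =>
      let key := (PySem.List.pyGetD row col "uuu", PySem.List.pyGetD row col2 "uuu")
      d.insert key (d.getD key 0 + 1)) PySem.Dict.empty
      = PySem.Dict.counter (currdata.map (fun row =>
          (PySem.List.pyGetD row col "uuu", PySem.List.pyGetD row col2 "uuu"))) := by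
    rw [← PySem.Dict.foldl_insert_getD_add_one_eq_counter, List.foldl_map]
  simp only [Count_Col_Score_alt]
  rw [hfreq, PySem.Dict.items_counter, pair_fold_eq, a_fold_eq_sum]
  rw [List.map_map]
  have hsum := sum_count_ofList (pvScoreOf panelty)
    (currdata.map (fun row => (PySem.List.pyGetD row col "uuu", PySem.List.pyGetD row col2 "uuu")))
  rw [List.map_map] at hsum
  simp only [Function.comp_def] at hsum ⊢
  rw [hsum]
  ring
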